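-- pv_equiv track=rewrite | github.com/s4hlo/the-farmer-was-replaced | utils_list.py | deserialize_2d_matrix_unsafe_CC
-- ===== SOURCE A (Python) =====
-- def index(ls, item):
-- 	for i in range(len(ls)):
-- 		if ls[i] == item:
-- 			return i
-- 	return None # TODO raise exception
--
-- def deserialize_2d_matrix_unsafe_CC(m, dim_len):
-- 	# Rebuilds a 2D matrix from a 1D list,
-- 	# distributing items as evenly as possible.
-- 	# Uses the Contiguous Chunks strategy.
-- 	# Args:
-- 	#     m: list
-- 	#     dim_len: int 0th dim target length (number of rows)
-- 	# Returns:
-- 	#     list[list]: 2D "best-effort" matrix distributed CC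
-- 	if dim_len <= 0:
-- 		return [m]
--
-- 	n = len(m)
-- 	if n == 0:
-- 		temp = []
-- 		for _ in range(dim_len):
-- 			temp.append([])
-- 		return temp
--
-- 	# Compute base size and remainder
-- 	# (extra elements to distribute)
-- 	rows = dim_len
-- 	base = n // rows
-- 	remainder = n % rows
--
-- 	res = []
-- 	idx = 0
-- 	i = 0
-- 	while i < rows:
-- 		# Give one extra element to
-- 		# the first `remainder` rows
-- 		if i < remainder:
-- 			extra = 1
-- 		else:
-- 			extra = 0
-- 		row_len = base + extra
-- 		row = m[idx:idx + row_len]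
-- 		res.append(row)
-- 		idx += row_len
-- 		i += 1
--
-- 	# If some elements remain (shouldn't
-- 	# happen), append them all to
-- 	# the last row
-- 	if idx < n:
-- 		res[-1].extend(m[index:])
--
-- 	return res
-- ===== SOURCE B (Python) =====
-- def deserialize_2d_matrix_unsafe_CC(m, dim_len):
--     # Closed-form slice bounds instead of a running index accumulator;
--     # the general formula also covers the empty-list case.
--     if dim_len <= 0:
--         return [m]
--     base, rem = divmod(len(m), dim_len)
--     return [m[i * base + min(i, rem):(i + 1) * base + min(i + 1, rem)]
--             for i in range(dim_len)]
-- ===== Notes on version B (the rewrite author's own statement) =====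
-- stated objective: simpler
-- what changed: Replaces the accumulator-driven while loop (running idx, per-row extra, separate empty-list branch and dead leftover-append branch) with a single comprehension computing each row's slice bounds by the closed form i*base+min(i,rem).
import Mathlib
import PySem

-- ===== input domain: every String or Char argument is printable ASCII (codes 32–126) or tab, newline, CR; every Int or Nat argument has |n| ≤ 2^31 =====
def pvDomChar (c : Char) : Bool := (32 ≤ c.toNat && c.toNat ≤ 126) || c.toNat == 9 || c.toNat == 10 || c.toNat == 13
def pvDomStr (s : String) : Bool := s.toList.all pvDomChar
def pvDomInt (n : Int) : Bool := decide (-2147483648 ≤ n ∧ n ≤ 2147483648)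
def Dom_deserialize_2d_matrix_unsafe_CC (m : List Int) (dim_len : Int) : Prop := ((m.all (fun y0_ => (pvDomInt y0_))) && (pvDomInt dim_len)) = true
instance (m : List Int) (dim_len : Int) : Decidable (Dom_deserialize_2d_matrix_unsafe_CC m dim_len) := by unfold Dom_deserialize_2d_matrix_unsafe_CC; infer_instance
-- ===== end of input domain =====

-- B replaces A's accumulator-driven while loop (running idx, separate empty-list branch,
-- dead leftover branch) with one comprehension using closed-form slice bounds: simpler.

-- ===== PORT A =====
-- the while loop: state (res, idx), counter i; fuel = rows.toNat suffices since i starts at 0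
def pvALoop (m : List Int) (rows base rem : Int) :
    Nat → Int → Int → List (List Int) → List (List Int) × Int
  | 0, _, idx, res => (res, idx)
  | fuel + 1, i, idx, res =>
    if i < rows then
      let extra : Int := if i < rem then 1 else 0
      let row_len := base + extra
      let row := PySem.List.slice m (some idx) (some (idx + row_len))
      pvALoop m rows base rem fuel (i + 1) (idx + row_len) (res ++ [row])
    else (res, idx)

def deserialize_2d_matrix_unsafe_CC (m : List Int) (dim_len : Int) : List (List Int) :=
  if dim_len ≤ 0 then [m]
  else
    let n : Int := m.length
    if n = 0 then
      (PySem.List.pyRange 0 dim_len 1).foldl (fun temp _ => temp ++ [[]]) []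
    else
      let rows := dim_len
      let base := PySem.Int.floordiv n rows
      let rem := PySem.Int.mod n rows
      let p := pvALoop m rows base rem rows.toNat 0 0 []
      -- Python's final `if idx < n: res[-1].extend(m[index:])` would raise a TypeError
      -- (slices by the function `index`), but idx = n always holds there, so the branch
      -- is dead in Python; ported as the identity on the dead branch.
      if p.2 < n then p.1 else p.1

-- ===== PORT B =====
def deserialize_2d_matrix_unsafe_CC_alt (m : List Int) (dim_len : Int) : List (List Int) :=
  if dim_len ≤ 0 then [m]
  else
    let n : Int := m.length
    let base := PySem.Int.floordiv n dim_len
    let rem := PySem.Int.mod n dim_len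
    (PySem.List.pyRange 0 dim_len 1).map (fun i =>
      PySem.List.slice m (some (i * base + min i rem)) (some ((i + 1) * base + min (i + 1) rem)))

-- ===== PRECONDITION & SPEC =====
def Spec_deserialize_2d_matrix_unsafe_CC (m : List Int) (dim_len : Int) (out : List (List Int)) : Prop := out = deserialize_2d_matrix_unsafe_CC_alt m dim_len
instance (m : List Int) (dim_len : Int) (out : List (List Int)) : Decidable (Spec_deserialize_2d_matrix_unsafe_CC m dim_len out) := by unfold Spec_deserialize_2d_matrix_unsafe_CC; infer_instance

-- ===== CLAIM (what is proved, stated in full; the proofs are below) =====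
def Claim_equal_deserialize_2d_matrix_unsafe_CC : Prop := ∀ (m : List Int) (dim_len : Int), Dom_deserialize_2d_matrix_unsafe_CC m dim_len → Spec_deserialize_2d_matrix_unsafe_CC m dim_len (deserialize_2d_matrix_unsafe_CC m dim_len)

-- ===== LEMMAS AND PROOFS =====

-- The loop invariant: with idx at its closed-form value, the loop appends exactly the
-- closed-form slices for the remaining indices, and ends with idx at the closed form of rows.
theorem pvALoop_eq (m : List Int) (rows base rem : Int) :
    ∀ (fuel : Nat) (i : Int) (res : List (List Int)),
      0 ≤ i → (rows - i).toNat ≤ fuel →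
      pvALoop m rows base rem fuel i (i * base + min i rem) res =
        (res ++ (PySem.List.pyRange i rows 1).map (fun j =>
          PySem.List.slice m (some (j * base + min j rem)) (some ((j + 1) * base + min (j + 1) rem))),
         (max i rows) * base + min (max i rows) rem) := by
  intro fuel
  induction fuel with
  | zero =>
    intro i res hi hf
    have hri : rows ≤ i := by omega
    rw [PySem.List.pyRange_one_eq_nil hri, max_eq_left hri]
    simp [pvALoop]
  | succ fuel ih =>
    intro i res hi hf
    by_cases hlt : i < rows
    · rw [PySem.List.pyRange_one_cons hlt]
      have hstep : i * base + min i rem + (base + if i < rem then (1:Int) else 0)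
          = (i + 1) * base + min (i + 1) rem := by
        split_ifs with h <;> [skip; skip] <;> (ring_nf; omega)
      simp only [pvALoop, if_pos hlt, List.map_cons]
      rw [hstep]
      rw [ih (i + 1) _ (by omega) (by omega)]
      have hmax : max (i + 1) rows = max i rows := by omega
      simp [hmax]
    · have hri : rows ≤ i := by omega
      rw [PySem.List.pyRange_one_eq_nil hri, max_eq_left hri]
      simp [pvALoop, hlt]

-- closed-form idx at rows equals n (div/mod identity), so the dead branch never fires
theorem pv_final_idx (n rows : Int) (hpos : 0 < rows) :
    rows * PySem.Int.floordiv n rows + min rows (PySem.Int.mod n rows) = n := by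
  have h1 := PySem.Int.floordiv_mul_add_mod n rows
  have h2 : 0 ≤ PySem.Int.mod n rows ∧ PySem.Int.mod n rows < rows := by
    rw [PySem.Int.mod_eq_emod_of_pos hpos]
    exact ⟨Int.emod_nonneg n (by omega), Int.emod_lt_of_pos n hpos⟩
  rw [mul_comm]
  omega

theorem pv_foldl_nil (l : List Int) (init : List (List Int)) :
    l.foldl (fun temp _ => temp ++ [([] : List Int)]) init
      = init ++ l.map (fun _ => []) := by
  induction l generalizing init with
  | nil => simp
  | cons x xs ih => simp [List.foldl, ih]

-- ===== VERDICT (by name: the statement is the Claim_ definition above) =====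
theorem deserialize_2d_matrix_unsafe_CC_spec : Claim_equal_deserialize_2d_matrix_unsafe_CC := by
  intro m dim_len _
  unfold Spec_deserialize_2d_matrix_unsafe_CC deserialize_2d_matrix_unsafe_CC deserialize_2d_matrix_unsafe_CC_alt
  by_cases hd : dim_len ≤ 0
  · simp [hd]
  · have hpos : 0 < dim_len := by omega
    simp only [if_neg hd]
    set n : Int := (m.length : Int) with hn
    have hn0 : 0 ≤ n := by positivity
    have hrem : 0 ≤ PySem.Int.mod n dim_len := by
      rw [PySem.Int.mod_eq_emod_of_pos hpos]; exact Int.emod_nonneg n (by omega)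
    by_cases hz : n = 0
    · -- empty list: A builds dim_len empty rows; B's slices are all empty since m = []
      have hm : m = [] := by
        have : m.length = 0 := by omega
        exact List.length_eq_zero_iff.mp this
      simp only [if_pos hz]
      rw [pv_foldl_nil]
      subst hm
      simp [PySem.List.slice]
    · simp only [if_neg hz]
      have hloop := pvALoop_eq m dim_len (PySem.Int.floordiv n dim_len)
        (PySem.Int.mod n dim_len) dim_len.toNat 0 [] le_rfl (by omega)
      have h0 : (0 : Int) * PySem.Int.floordiv n dim_len + min 0 (PySem.Int.mod n dim_len) = 0 := by
        omega
      rw [h0] at hloop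
      have hmax : max (0 : Int) dim_len = dim_len := by omega
      rw [hmax] at hloop
      rw [hloop]
      have := pv_final_idx n dim_len hpos
      simp only [this]
      simp
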